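-- pv_equiv track=rewrite | github.com/zhengLabs/pFedMI | servers/serverutil.py | update_last_clients
-- ===== SOURCE A (Python) =====
-- def update_last_clients(clients_in_comm, last_clients, n):
--     for client in clients_in_comm:
--         if len(last_clients) < n:
--             if client in last_clients:
--                 index = last_clients.index(client)
--                 del last_clients[index]
--             last_clients.append(client)
--         else:
--             if client not in last_clients:
--                 index = 0
--             else:
--                 index = last_clients.index(client)
--             del last_clients[index]
--             last_clients.append(client)
--     return last_clients
-- ===== SOURCE B (Python) =====
-- def update_last_clients(clients_in_comm, last_clients, n):
--     def touch(last, c):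
--         if c in last:
--             i = last.index(c)
--             return last[:i] + last[i+1:] + [c]   # move first occurrence to the end
--         if len(last) < n:
--             return last + [c]                    # room left: just append
--         return last[1:] + [c]                    # full: drop the oldest, append
--     result = last_clients
--     for c in clients_in_comm:
--         result = touch(result, c)
--     last_clients[:] = result
--     return last_clients
-- ===== Notes on version B (the rewrite author's own statement) =====
-- stated objective: simpler
-- what changed: Replaces A's in-place list surgery (membership test, .index, del by index, the index=0 eviction trick, and two duplicated hit branches) with a pure fold of a single three-case 'touch' step built from slices (move first occurrence to the end / append / drop the oldest); Pre_ excludes only the inputs on which A raises IndexError (empty last_clients, nonempty clients_in_comm, n < 1).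
import Mathlib
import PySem

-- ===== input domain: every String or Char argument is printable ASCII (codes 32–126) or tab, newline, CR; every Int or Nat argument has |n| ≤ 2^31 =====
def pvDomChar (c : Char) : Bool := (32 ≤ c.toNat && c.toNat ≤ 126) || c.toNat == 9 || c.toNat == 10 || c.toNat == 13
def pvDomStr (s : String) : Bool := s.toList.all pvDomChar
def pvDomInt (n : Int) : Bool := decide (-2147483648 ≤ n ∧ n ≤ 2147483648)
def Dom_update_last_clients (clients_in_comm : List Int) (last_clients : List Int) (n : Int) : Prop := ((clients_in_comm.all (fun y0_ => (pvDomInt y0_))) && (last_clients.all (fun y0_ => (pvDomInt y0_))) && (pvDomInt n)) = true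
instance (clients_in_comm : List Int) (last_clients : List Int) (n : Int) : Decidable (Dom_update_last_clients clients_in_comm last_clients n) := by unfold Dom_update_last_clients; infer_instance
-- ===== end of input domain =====

-- B replaces A's in-place del/index surgery and duplicated branches with a pure
-- fold: one slice-built 'touch' step (move first occurrence to the end / append /
-- drop the oldest); objective: simpler. Equivalence is about the RETURN value;
-- A mutates last_clients in place and B performs the same net mutation via
-- last_clients[:] = ... at the end.


-- ===== PORT A =====
-- one iteration of A's for-loop body (list `last` is the mutable last_clients)
def ulcStepA (n : Int) (last : List Int) (client : Int) : List Int :=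
  if (last.length : Int) < n then
    let last1 :=
      if last.contains client then
        match PySem.List.index? last client with
        | some index => ((PySem.List.pop? last (index : Int)).map (·.2)).getD last
        | none => last
      else last
    last1 ++ [client]
  else
    let index : Int := if !last.contains client then 0 else (((PySem.List.index? last client).getD 0 : Nat) : Int)
    (((PySem.List.pop? last index).map (·.2)).getD last) ++ [client]

def update_last_clients (clients_in_comm : List Int) (last_clients : List Int) (n : Int) : List Int :=
  clients_in_comm.foldl (ulcStepA n) last_clients

-- ===== PORT B =====
-- B's pure step `touch(last, c)` (slices; no mutation)
def ulcTouch (n : Int) (last : List Int) (c : Int) : List Int :=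
  if last.contains c then
    let i : Int := (((PySem.List.index? last c).getD 0 : Nat) : Int)
    PySem.List.slice last none (some i) ++ PySem.List.slice last (some (i + 1)) none ++ [c]
  else if (last.length : Int) < n then
    last ++ [c]
  else
    PySem.List.slice last (some 1) none ++ [c]

def update_last_clients_alt (clients_in_comm : List Int) (last_clients : List Int) (n : Int) : List Int :=
  -- result = last_clients; for c in clients_in_comm: result = touch(result, c); last_clients[:] = result
  clients_in_comm.foldl (ulcTouch n) last_clients

-- ===== PRECONDITION & SPEC =====
-- Pre_ excludes exactly the inputs on which A raises IndexError (`del last_clients[0]`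
-- on an empty list: empty last_clients, nonempty clients_in_comm, n < 1); A returns on
-- every other input and B matches it there.
def Pre_update_last_clients (clients_in_comm : List Int) (last_clients : List Int) (n : Int) : Prop :=
  last_clients = [] → clients_in_comm = [] ∨ 1 ≤ n
instance (clients_in_comm : List Int) (last_clients : List Int) (n : Int) : Decidable (Pre_update_last_clients clients_in_comm last_clients n) := by unfold Pre_update_last_clients; infer_instance
def pvWitness_update_last_clients : List Int × List Int × Int := ([5, 2, 5, 9], [1, 2, 1], 3)

def Spec_update_last_clients (clients_in_comm : List Int) (last_clients : List Int) (n : Int) (out : List Int) : Prop := out = update_last_clients_alt clients_in_comm last_clients n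
instance (clients_in_comm : List Int) (last_clients : List Int) (n : Int) (out : List Int) : Decidable (Spec_update_last_clients clients_in_comm last_clients n out) := by unfold Spec_update_last_clients; infer_instance

-- ===== CLAIM (what is proved, stated in full; the proofs are below) =====
def Claim_equal_update_last_clients : Prop := ∀ (clients_in_comm : List Int) (last_clients : List Int) (n : Int), Dom_update_last_clients clients_in_comm last_clients n → Pre_update_last_clients clients_in_comm last_clients n → Spec_update_last_clients clients_in_comm last_clients n (update_last_clients clients_in_comm last_clients n)

-- ===== LEMMAS AND PROOFS =====

-- A-side: pop at the index found by .index is List.erase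
lemma pop_index_erase (ls : List Int) (c : Int) : ∀ (i : Nat), PySem.List.index? ls c = some i →
    PySem.List.pop? ls (i : Int) = some (c, ls.erase c) := by
  induction ls with
  | nil => intro i h; simp [PySem.List.index?_eq_idxOf?] at h
  | cons x t ih =>
    intro i h
    by_cases hx : x = c
    · subst hx
      rw [PySem.List.index?_cons_self] at h
      cases h
      simp [PySem.List.pop?_zero_cons]
    · rw [PySem.List.index?_cons_of_ne t hx] at h
      match hj : PySem.List.index? t c with
      | none => rw [hj] at h; simp at h
      | some j =>
        rw [hj] at h; simp at h
        subst h
        have hje := ih j hj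
        have hjlen : j < t.length := by
          obtain ⟨hk, _, _⟩ := PySem.List.getElem_of_index?_eq_some hj
          exact hk
        rw [PySem.List.pop?_natCast t j hjlen] at hje
        simp at hje
        rw [PySem.List.pop?_natCast (x :: t) (j+1) (show j + 1 < (x :: t).length by simpa using hjlen)]
        simp [hx, hje.1, hje.2]

-- B-side: removing the element .index found is take/drop around it
lemma erase_take_drop (c : Int) : ∀ (ls : List Int) (i : Nat), PySem.List.index? ls c = some i →
    ls.erase c = ls.take i ++ ls.drop (i + 1) := by
  intro ls
  induction ls with
  | nil => intro i h; simp [PySem.List.index?_eq_idxOf?] at h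
  | cons x t ih =>
    intro i h
    by_cases hx : x = c
    · subst hx
      rw [PySem.List.index?_cons_self] at h
      cases h
      simp
    · rw [PySem.List.index?_cons_of_ne t hx] at h
      match hj : PySem.List.index? t c with
      | none => rw [hj] at h; simp at h
      | some j =>
        rw [hj] at h; simp at h
        subst h
        rw [List.erase_cons_tail (by simpa using hx)]
        simp only [List.take_succ_cons, List.drop_succ_cons, List.cons_append]
        rw [ih j hj]

-- the two loop bodies agree on every state
lemma step_eq (n : Int) (ls : List Int) (c : Int) : ulcStepA n ls c = ulcTouch n ls c := by
  by_cases hc : c ∈ ls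
  · have hcb : ls.contains c = true := by simpa using hc
    obtain ⟨i, hi⟩ := Option.isSome_iff_exists.1 ((PySem.List.index?_isSome_iff ls c).2 hc)
    have hpop := pop_index_erase ls c i hi
    have htd := erase_take_drop c ls i hi
    have hslice : PySem.List.slice ls none (some ((i : Nat) : Int)) ++
        PySem.List.slice ls (some (((i : Nat) : Int) + 1)) none ++ [c] = ls.erase c ++ [c] := by
      rw [PySem.List.slice_to_natCast, htd]
      rw [show ((i : Nat) : Int) + 1 = (((i + 1 : Nat)) : Int) by push_cast; ring]
      rw [PySem.List.slice_from_natCast]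
    unfold ulcStepA ulcTouch
    simp only [hcb, Bool.not_true, Bool.false_eq_true, if_false, if_true, hi, Option.getD_some]
    rw [hslice]
    split_ifs with hlen
    · rw [hpop]; simp
    · rw [hpop]; simp
  · have hcb : ls.contains c = false := by simpa using hc
    unfold ulcStepA ulcTouch
    simp only [hcb, Bool.not_false, Bool.false_eq_true, if_false, if_true]
    split_ifs with hlen
    · rfl
    · rw [PySem.List.slice_from_one]
      cases ls with
      | nil => simp [PySem.List.pop?]
      | cons x t => simp [PySem.List.pop?_zero_cons]

lemma foldl_eq (n : Int) : ∀ (cs : List Int) (ls : List Int),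
    cs.foldl (ulcStepA n) ls = cs.foldl (ulcTouch n) ls := by
  intro cs
  induction cs with
  | nil => intro ls; rfl
  | cons c r ih => intro ls; simp only [List.foldl_cons, step_eq, ih]

-- ===== VERDICT (by name: the statement is the Claim_ definition above) =====
theorem update_last_clients_spec : Claim_equal_update_last_clients := by
  intro cs ls n _ _
  unfold Spec_update_last_clients update_last_clients update_last_clients_alt
  exact foldl_eq n cs ls
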